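-- pv_equiv track=rewrite | github.com/veryneuron/algorithm_study | programmers/dev-matching/1.py | solution
-- ===== SOURCE A (Python) =====
-- def solution(grade):
--     answer = 0
--     before = grade[-1]
--     grade.reverse()
--     for idx, g in enumerate(grade):
--         if g > before:
--             answer += g - before
--             grade[idx] = before
--         else:
--             before = g
--     return answer
-- ===== SOURCE B (Python) =====
-- def solution(grade):
--     # Monotonic stack of runs (value, count) of the suffix-minimum sequence,
--     # built in one left-to-right pass over the original list (no reverse, no
--     # running-min variable): a new element pops every stacked run with a larger
--     # value and absorbs its count.
--     stack = []
--     for x in grade: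
--         k = 1
--         while stack and stack[-1][0] > x:
--             k += stack.pop()[1]
--         stack.append((x, k))
--     answer = sum(grade) - sum(v * k for v, k in stack)
--     grade[:] = [v for v, k in reversed(stack) for _ in range(k)]
--     return answer
-- ===== Notes on version B (the rewrite author's own statement) =====
-- stated objective: alternative
-- what changed: Replaces A's reverse-then-running-min clamp pass by a monotonic stack of (value,count) runs built in one left-to-right pass over the original list (each element pops and absorbs larger runs); the answer is sum(grade) minus the stack's weighted value sum, and the same in-place mutation is reproduced by expanding the stack.
import Mathlib
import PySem

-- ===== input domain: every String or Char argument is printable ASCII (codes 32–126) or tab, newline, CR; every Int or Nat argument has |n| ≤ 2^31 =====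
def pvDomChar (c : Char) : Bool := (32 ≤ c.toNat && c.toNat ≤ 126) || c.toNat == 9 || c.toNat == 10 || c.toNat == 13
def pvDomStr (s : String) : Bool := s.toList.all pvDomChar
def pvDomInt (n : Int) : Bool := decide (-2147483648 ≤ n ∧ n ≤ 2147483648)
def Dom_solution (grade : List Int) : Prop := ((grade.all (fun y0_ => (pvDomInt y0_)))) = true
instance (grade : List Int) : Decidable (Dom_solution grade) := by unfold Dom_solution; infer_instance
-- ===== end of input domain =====

-- B replaces A's reverse-then-running-min clamp pass by a monotonic stack of (value,count) runs
-- built left-to-right over the original list; answer = sum(grade) - weighted stack sum (alternative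
-- algorithm, same cost).  B performs the same in-place mutation as A (the proved equivalence is
-- about the return value).


-- ===== PORT A =====
-- One pass over the reversed list with state (answer, before).  A's write 'grade[idx] = before'
-- happens at the index just read, so it never changes a value the loop still reads: the return
-- value is exactly this fold over the reversed list.
def solution (grade : List Int) : Int :=
  match PySem.List.pyGet? grade (-1) with
  | none => 0   -- Python raises IndexError here (grade[-1] of []); excluded by Pre_solution
  | some b0 =>
    (grade.reverse.foldl
      (fun (s : Int × Int) g => if g > s.2 then (s.1 + (g - s.2), s.2) else (s.1, g))
      (0, b0)).1

-- ===== PORT B =====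
-- The Python while-loop 'while stack and stack[-1][0] > x: k += stack.pop()[1]'; the stack is
-- kept top-first (Python's list end = our list head); the run count k is a Nat (it starts at 1
-- and only grows, so this is exact).
def popAcc (st : List (Int × Nat)) (x : Int) (k : Nat) : List (Int × Nat) × Nat :=
  match st with
  | [] => ([], k)
  | (v, c) :: t => if v > x then popAcc t x (k + c) else ((v, c) :: t, k)

def solution_alt (grade : List Int) : Int :=
  let stack := grade.foldl
    (fun st x => let p := popAcc st x 1; (x, p.2) :: p.1) []
  -- answer = sum(grade) - sum(v * k for v, k in stack)
  grade.sum - (stack.map (fun p => p.1 * (p.2 : Int))).sum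

-- ===== PRECONDITION & SPEC =====
-- A raises IndexError (grade[-1]) on the empty list; nothing else is excluded.
def Pre_solution (grade : List Int) : Prop := grade ≠ []
instance (grade : List Int) : Decidable (Pre_solution grade) := by unfold Pre_solution; infer_instance
def pvWitness_solution : List Int := [1, 4, 2]

def Spec_solution (grade : List Int) (out : Int) : Prop := out = solution_alt grade
instance (grade : List Int) (out : Int) : Decidable (Spec_solution grade out) := by unfold Spec_solution; infer_instance

-- ===== CLAIM (what is proved, stated in full; the proofs are below) =====
def Claim_equal_solution : Prop := ∀ (grade : List Int), Dom_solution grade → Pre_solution grade → Spec_solution grade (solution grade)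

-- ===== LEMMAS AND PROOFS =====

/-- Running-minimum list with seed `b`: `minsAux b gs` lists `min` of `b` and each nonempty prefix of `gs`. -/
def minsAux (b : Int) : List Int → List Int
  | [] => []
  | g :: t => min b g :: minsAux (min b g) t

/-- Prefix-minimum list. -/
def PM : List Int → List Int
  | [] => []
  | x :: t => x :: minsAux x t

/-- Expansion of the run stack into the plain list it encodes (top run first). -/
def expandSt (st : List (Int × Nat)) : List Int :=
  st.flatMap (fun p => List.replicate p.2 p.1)

lemma foldA_fst (t : List Int) : ∀ (a b : Int),
    (t.foldl (fun (s : Int × Int) g => if g > s.2 then (s.1 + (g - s.2), s.2) else (s.1, g))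
        (a, b)).1 = a + t.sum - (minsAux b t).sum := by
  induction t with
  | nil => intro a b; simp [minsAux]
  | cons g t ih =>
      intro a b
      simp only [List.foldl_cons, minsAux, List.sum_cons]
      by_cases h : g > b
      · have hm : min b g = b := by omega
        rw [if_pos h, hm, ih]; ring
      · have hm : min b g = g := by omega
        rw [if_neg h, hm, ih]; ring

lemma map_min_minsAux (x : Int) (t : List Int) : ∀ b,
    (minsAux b t).map (fun p => min x p) = minsAux (min x b) t := by
  induction t with
  | nil => intro b; simp [minsAux]
  | cons g t ih =>
      intro b
      simp only [minsAux, List.map_cons, ih, min_assoc]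

lemma PM_cons (x : Int) (r : List Int) :
    PM (x :: r) = x :: (PM r).map (fun p => min x p) := by
  cases r with
  | nil => simp [PM, minsAux]
  | cons y t => simp [PM, minsAux, map_min_minsAux]

lemma popAcc_eq (x : Int) : ∀ (st : List (Int × Nat)) (k : Nat),
    popAcc st x k = (st.dropWhile (fun p => decide (p.1 > x)),
      k + ((st.takeWhile (fun p => decide (p.1 > x))).map (fun p => p.2)).sum) := by
  intro st
  induction st with
  | nil => intro k; simp [popAcc, List.dropWhile, List.takeWhile]
  | cons p t ih =>
      intro k
      obtain ⟨v, c⟩ := p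
      by_cases h : v > x
      · simp [popAcc, List.dropWhile, List.takeWhile, h, ih, Nat.add_assoc]
      · simp [popAcc, List.dropWhile, List.takeWhile, h]

/-- Every element surviving the pops has value ≤ x, given the stack is sorted (top largest). -/
lemma dropWhile_le (x : Int) : ∀ (st : List (Int × Nat)),
    st.Pairwise (fun a b => b.1 ≤ a.1) →
    ∀ p ∈ st.dropWhile (fun p => decide (p.1 > x)), p.1 ≤ x := by
  intro st
  induction st with
  | nil => intro _ p hp; simp [List.dropWhile] at hp
  | cons q t ih =>
      intro hs p hp
      rcases List.pairwise_cons.mp hs with ⟨hq, ht⟩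
      by_cases h : q.1 > x
      · rw [List.dropWhile_cons_of_pos (by simpa using h)] at hp
        exact ih ht p hp
      · rw [List.dropWhile_cons_of_neg (by simpa using h)] at hp
        rcases List.mem_cons.mp hp with rfl | hp2
        · omega
        · have h2 := hq p hp2
          omega

lemma expand_all_gt (x : Int) : ∀ (st : List (Int × Nat)),
    (∀ p ∈ st, p.1 > x) →
    (expandSt st).map (fun p => min x p) =
      List.replicate ((st.map (fun p => p.2)).sum) x := by
  intro st
  induction st with
  | nil => intro _; simp [expandSt]
  | cons q t ih =>
      intro h
      have hq : q.1 > x := h q (by simp)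
      simp only [expandSt, List.flatMap_cons, List.map_append, List.map_replicate,
        List.map_cons, List.sum_cons, List.replicate_add]
      rw [min_eq_left (le_of_lt hq)]
      congr 1
      exact ih (fun p hp => h p (by simp [hp]))

lemma expand_all_le (x : Int) : ∀ (st : List (Int × Nat)),
    (∀ p ∈ st, p.1 ≤ x) →
    (expandSt st).map (fun p => min x p) = expandSt st := by
  intro st
  induction st with
  | nil => intro _; simp [expandSt]
  | cons q t ih =>
      intro h
      have hq : q.1 ≤ x := h q (by simp)
      simp only [expandSt, List.flatMap_cons, List.map_append, List.map_replicate]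
      rw [min_eq_right hq]
      congr 1
      exact ih (fun p hp => h p (by simp [hp]))

/-- One step of B's fold preserves the invariant. -/
lemma step_inv (x : Int) (st : List (Int × Nat)) (r : List Int)
    (hE : expandSt st = PM r) (hS : st.Pairwise (fun a b => b.1 ≤ a.1)) :
    expandSt ((x, (popAcc st x 1).2) :: (popAcc st x 1).1) = PM (x :: r) ∧
    ((x, (popAcc st x 1).2) :: (popAcc st x 1).1).Pairwise (fun a b => b.1 ≤ a.1) := by
  rw [popAcc_eq]
  have hdle : ∀ q ∈ st.dropWhile (fun p => decide (p.1 > x)), q.1 ≤ x := dropWhile_le x st hS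
  have htgt : ∀ q ∈ st.takeWhile (fun p => decide (p.1 > x)), q.1 > x := by
    intro q hq
    have := List.mem_takeWhile_imp hq
    exact of_decide_eq_true this
  constructor
  · have hsplit : expandSt st = expandSt (st.takeWhile (fun p => decide (p.1 > x)))
        ++ expandSt (st.dropWhile (fun p => decide (p.1 > x))) := by
      simp [expandSt, ← List.flatMap_append, List.takeWhile_append_dropWhile]
    rw [PM_cons, ← hE, hsplit, List.map_append, expand_all_gt x _ htgt,
      expand_all_le x _ hdle]
    simp [expandSt, List.replicate_add, List.replicate_succ]
  · exact List.pairwise_cons.mpr ⟨fun q hq => hdle q hq, hS.sublist (List.dropWhile_sublist _)⟩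

/-- B's fold maintains: the expanded stack is the prefix-minimum list of the reversed processed input. -/
lemma fold_inv : ∀ (l : List Int) (st : List (Int × Nat)) (r : List Int),
    expandSt st = PM r → st.Pairwise (fun a b => b.1 ≤ a.1) →
    expandSt (l.foldl (fun st x => let p := popAcc st x 1; (x, p.2) :: p.1) st) = PM (l.reverse ++ r) ∧
    (l.foldl (fun st x => let p := popAcc st x 1; (x, p.2) :: p.1) st).Pairwise (fun a b => b.1 ≤ a.1) := by
  intro l
  induction l with
  | nil => intro st r hE hS; exact ⟨by simpa using hE, hS⟩
  | cons x l ih =>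
      intro st r hE hS
      obtain ⟨h1, h2⟩ := step_inv x st r hE hS
      have := ih _ (x :: r) h1 h2
      simpa using this

lemma sum_expand (st : List (Int × Nat)) :
    (expandSt st).sum = (st.map (fun p => p.1 * (p.2 : Int))).sum := by
  induction st with
  | nil => simp [expandSt]
  | cons q t ih =>
      simp [expandSt, List.sum_replicate, mul_comm] at *
      omega

lemma minsAux_self_eq_PM (g0 : Int) (rest : List Int) :
    minsAux g0 (g0 :: rest) = PM (g0 :: rest) := by
  simp [minsAux, PM]

-- ===== VERDICT (by name: the statement is the Claim_ definition above) =====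
theorem solution_spec : Claim_equal_solution := by
  intro grade _ hpre
  unfold Spec_solution solution solution_alt
  have hrev : grade.reverse ≠ [] := by simpa using hpre
  obtain ⟨g0, rest, hr⟩ := List.exists_cons_of_ne_nil hrev
  have hlast : PySem.List.pyGet? grade (-1) = some g0 := by
    rw [PySem.List.pyGet?_neg_one, ← List.head?_reverse, hr]; rfl
  have hinv := fold_inv grade [] [] (by simp [expandSt, PM]) (by simp)
  rw [hlast]
  dsimp only
  rw [hr, foldA_fst, minsAux_self_eq_PM, ← sum_expand, hinv.1]
  simp only [List.append_nil]
  rw [← hr, List.sum_reverse]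
  ring
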